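-- pv_equiv track=rewrite | github.com/yonkshi/TARS | wavenet/data.py | index2str
-- ===== SOURCE A (Python) =====
-- index2byte = [' ', 'a', 'b', 'c', 'd', 'e', 'f', 'g',
--               'h', 'i', 'j', 'k', 'l', 'm', 'n', 'o', 'p', 'q',
--               'r', 's', 't', 'u', 'v', 'w', 'x', 'y', 'z', '<EMP>']
--
-- def index2str(index_list):
--     # transform label index to character
--     str_ = ''
--     for ch in index_list:
--         if ch > 0:
--             str_ += index2byte[ch]
--         elif ch == 0:  # <EOS>
--             break
--     return str_
-- ===== SOURCE B (Python) =====
-- index2byte = [' ', 'a', 'b', 'c', 'd', 'e', 'f', 'g',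
--               'h', 'i', 'j', 'k', 'l', 'm', 'n', 'o', 'p', 'q',
--               'r', 's', 't', 'u', 'v', 'w', 'x', 'y', 'z', '<EMP>']
--
-- def index2str(index_list):
--     # find the EOS boundary first, then build the string in one join
--     try:
--         end = index_list.index(0)
--     except ValueError:
--         end = len(index_list)
--     return ''.join(index2byte[ch] for ch in index_list[:end] if ch > 0)
-- ===== Notes on version B (the rewrite author's own statement) =====
-- stated objective: idiomatic
-- what changed: Replaces the fused loop-with-break-and-accumulator by a two-stage 'find EOS boundary with list.index, then build the string with one join over the filtered prefix' decomposition.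
import Mathlib
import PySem

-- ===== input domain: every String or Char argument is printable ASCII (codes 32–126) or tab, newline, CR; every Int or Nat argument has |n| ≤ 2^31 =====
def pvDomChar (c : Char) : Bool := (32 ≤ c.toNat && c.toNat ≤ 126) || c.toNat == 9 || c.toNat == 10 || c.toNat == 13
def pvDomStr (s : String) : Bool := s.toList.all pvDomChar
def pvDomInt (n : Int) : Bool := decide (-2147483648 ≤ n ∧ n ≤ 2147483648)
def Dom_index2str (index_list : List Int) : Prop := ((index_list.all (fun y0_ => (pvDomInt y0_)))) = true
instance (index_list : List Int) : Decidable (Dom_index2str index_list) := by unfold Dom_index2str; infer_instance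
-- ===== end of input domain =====

-- B replaces A's fused loop-with-break by 'find the EOS boundary, then join the filtered prefix' (idiomatic decomposition).

-- ===== PORT A =====
-- the module-level table index2byte, shared by both ports (characters as List Char)
def pvIndex2byte : List (List Char) :=
  [[' '], ['a'], ['b'], ['c'], ['d'], ['e'], ['f'], ['g'],
   ['h'], ['i'], ['j'], ['k'], ['l'], ['m'], ['n'], ['o'], ['p'], ['q'],
   ['r'], ['s'], ['t'], ['u'], ['v'], ['w'], ['x'], ['y'], ['z'],
   ['<', 'E', 'M', 'P', '>']]

-- A's loop: accumulator str_, append on ch > 0, break on ch == 0, else skip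
def pvLoopA : List Int → List Char → List Char
  | [], str_ => str_
  | ch :: rest, str_ =>
    if 0 < ch then pvLoopA rest (str_ ++ ((PySem.List.pyGet? pvIndex2byte ch).getD []))
    else if ch = 0 then str_
    else pvLoopA rest str_

def index2str (index_list : List Int) : String :=
  String.ofList (pvLoopA index_list [])

-- ===== PORT B =====
def index2str_alt (index_list : List Int) : String :=
  let endIdx : Nat := (PySem.List.index? index_list 0).getD index_list.length
  let pre := index_list.take endIdx
  String.ofList (PySem.Chars.join []
    ((pre.filter (fun ch => 0 < ch)).map
      (fun ch => (PySem.List.pyGet? pvIndex2byte ch).getD [])))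

-- ===== PRECONDITION & SPEC =====
-- Pre_ excludes exactly the inputs where Python A raises IndexError: an index ≥ 28
-- occurring before the first 0 (the EOS sentinel).
def Pre_index2str (index_list : List Int) : Prop :=
  ∀ ch ∈ index_list.takeWhile (fun x => x ≠ 0), 0 < ch → ch < 28
instance (index_list : List Int) : Decidable (Pre_index2str index_list) := by
  unfold Pre_index2str; infer_instance

def pvWitness_index2str : List Int := [3, 1, 20, -1, 19, 0, 99]

def Spec_index2str (index_list : List Int) (out : String) : Prop := out = index2str_alt index_list
instance (index_list : List Int) (out : String) : Decidable (Spec_index2str index_list out) := by unfold Spec_index2str; infer_instance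

-- ===== CLAIM (what is proved, stated in full; the proofs are below) =====
def Claim_equal_index2str : Prop := ∀ (index_list : List Int), Dom_index2str index_list → Pre_index2str index_list → Spec_index2str index_list (index2str index_list)

-- ===== LEMMAS AND PROOFS =====

-- the prefix B takes is exactly the takeWhile-(≠ 0) prefix A traverses before its break
lemma take_index?_eq_takeWhile (xs : List Int) :
    xs.take ((PySem.List.index? xs 0).getD xs.length) = xs.takeWhile (fun x => x ≠ 0) := by
  induction xs with
  | nil => simp
  | cons x rest ih =>
    by_cases hx : x = 0
    · subst hx
      rw [PySem.List.index?_cons_self]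
      simp
    · rw [PySem.List.index?_cons_of_ne rest hx]
      cases h : PySem.List.index? rest 0 with
      | none =>
        simp only [Option.map_none, Option.getD_none, List.length_cons, List.take_succ_cons]
        simp [hx]
        rw [h] at ih; simpa using ih
      | some k =>
        simp only [Option.map_some, Option.getD_some, List.take_succ_cons]
        simp [hx]
        rw [h] at ih; simpa using ih

-- ''.join with empty separator is concatenation of the pieces
lemma join_empty (parts : List (List Char)) : PySem.Chars.join [] parts = parts.flatten := by
  induction parts with
  | nil => simp [PySem.Chars.join_nil]
  | cons p rest ih =>
    cases rest with
    | nil => simp [PySem.Chars.join_singleton]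
    | cons q t => simp [PySem.Chars.join_cons_cons, ih]

-- A's loop, run over any list, appends the flattened filtered-and-mapped takeWhile prefix
lemma loopA_eq (xs : List Int) : ∀ acc : List Char,
    pvLoopA xs acc =
      acc ++ (((xs.takeWhile (fun x => x ≠ 0)).filter (fun ch => 0 < ch)).map
        (fun ch => (PySem.List.pyGet? pvIndex2byte ch).getD [])).flatten := by
  induction xs with
  | nil => intro acc; simp [pvLoopA]
  | cons ch rest ih =>
    intro acc
    by_cases h0 : (0 : Int) < ch
    · have hne : ch ≠ 0 := by omega
      simp [pvLoopA, h0, hne, ih]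
    · by_cases hz : ch = 0
      · simp [pvLoopA, hz]
      · simp [pvLoopA, h0, hz, ih]

-- ===== VERDICT (by name: the statement is the Claim_ definition above) =====
theorem index2str_spec : Claim_equal_index2str := by
  intro xs _ _
  unfold Spec_index2str index2str index2str_alt
  simp only [take_index?_eq_takeWhile, loopA_eq, join_empty]
  simp
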